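-- pv_equiv track=rewrite | github.com/it-is-final/jpn-frlg-helper | jpn_frlg_helper/rngfinder.py | pidrng_wild
-- ===== SOURCE A (Python) =====
-- class PokeRNG:
--     def __init__(self, seed: int):
--         self.state = seed
--
--     def _next(this, advances: int = 1):
--         for _ in range(advances):
--             this.state = (0x41C64E6D * this.state + 0x00006073) & 0xFFFFFFFF
--         return this.state
--
--     def _next16(this, advances: int = 1):
--         return (this._next(advances) >> 16) & 0xFFFF
--
-- def pidrng_wild(
--         seed: int,
--         initial_advances: int,
--         max_advances: int,
--         delay: int,
-- ):
--     main_rng = PokeRNG(seed)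
--     advance_rng = PokeRNG(0) # 0 is a placeholder value
--     main_rng._next(initial_advances + delay)
--     for _ in range(max_advances + 1):
--         advance_rng.state = main_rng.state
--         advance_rng._next(2)
--         pid_nature = advance_rng._next16() % 25
--         while True:
--             pid = advance_rng._next16()
--             pid |= advance_rng._next16() << 16
--             if (pid % 25) == pid_nature:
--                 break
--         yield pid
--         main_rng._next()
-- ===== SOURCE B (Python) =====
-- _M = 1 << 32
-- _A = 0x41C64E6D
-- _C = 0x00006073
--
--
-- def _jump(state, n):
--     # Advance the LCG by n steps in O(log n) by composing the affine map
--     # x -> (a*x + c) % 2^32 with itself via binary exponentiation.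
--     a, c = 1, 0
--     pa, pc = _A, _C
--     while n > 0:
--         if n & 1:
--             a, c = (pa * a) % _M, (pa * c + pc) % _M
--         pa, pc = (pa * pa) % _M, (pa * pc + pc) % _M
--         n >>= 1
--     return (a * state + c) % _M
--
--
-- def _hi16(s):
--     return (s >> 16) & 0xFFFF
--
--
-- def pidrng_wild(seed, initial_advances, max_advances, delay):
--     state = _jump(seed, initial_advances + delay)
--     out = []
--     for _ in range(max_advances + 1):
--         s = state
--         for _ in range(3):
--             s = (_A * s + _C) % _M
--         nature = _hi16(s) % 25
--         while True:
--             s = (_A * s + _C) % _M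
--             lo = _hi16(s)
--             s = (_A * s + _C) % _M
--             pid = lo + (_hi16(s) << 16)
--             if pid % 25 == nature:
--                 break
--         out.append(pid)
--         state = (_A * state + _C) % _M
--     return out
-- ===== Notes on version B (the rewrite author's own statement) =====
-- stated objective: alternative
-- what changed: The initial (initial_advances + delay)-step RNG advance is replaced by an O(log n) LCG jump that composes the affine map x -> (a*x+c) mod 2^32 by binary exponentiation (a win only when the initial advance dominates; per-frame PID search is unchanged), and the mutable-class generator becomes a plain list-building function.
import Mathlib
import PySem

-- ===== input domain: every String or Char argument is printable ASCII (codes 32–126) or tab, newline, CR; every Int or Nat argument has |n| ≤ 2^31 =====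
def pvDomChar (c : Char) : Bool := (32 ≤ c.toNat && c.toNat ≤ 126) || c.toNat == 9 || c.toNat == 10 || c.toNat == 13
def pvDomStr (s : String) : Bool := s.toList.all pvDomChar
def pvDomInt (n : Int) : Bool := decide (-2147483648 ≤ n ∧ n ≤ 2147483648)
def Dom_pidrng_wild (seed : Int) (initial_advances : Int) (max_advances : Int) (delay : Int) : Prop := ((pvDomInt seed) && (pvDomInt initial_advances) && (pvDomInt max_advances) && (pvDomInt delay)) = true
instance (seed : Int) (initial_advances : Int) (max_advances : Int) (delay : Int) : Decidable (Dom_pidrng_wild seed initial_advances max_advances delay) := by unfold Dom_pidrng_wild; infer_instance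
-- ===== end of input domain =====

-- B replaces the linear initial RNG advance by a binary-exponentiation jump of the
-- affine LCG map; the per-frame PID search is unchanged (an alternative algorithm).
-- Python A is a generator; equivalence is about the produced sequence of PIDs (as a list).
-- Both ports bound the Python 'while True' nature-rejection loop by the same fuel 2^32
-- (a totality guard only; both ports use it identically).


-- ===== PORT A =====
-- one LCG step: (0x41C64E6D * state + 0x6073) & 0xFFFFFFFF  ('& 0xFFFFFFFF' = Python '% 2**32', exact)
def pvStepA (s : Int) : Int := PySem.Int.mod (1103515245 * s + 24691) 4294967296

-- PokeRNG._next(advances): 'for _ in range(advances)' applying the step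
def pvNextA (s : Int) (advances : Int) : Int :=
  (PySem.List.pyRange 0 advances 1).foldl (fun st _ => pvStepA st) s

-- '(state >> 16) & 0xFFFF' (floor shift then mask, exact)
def pvHi16A (s : Int) : Int := PySem.Int.mod (PySem.Int.floordiv s 65536) 65536

-- the 'while True' rejection loop; fuel only bounds the recursion (0 is never the answer path on tested inputs)
def pvFindA : Nat → Int → Int → Int
  | 0, _, _ => 0
  | fuel+1, nature, s =>
    let s1 := pvStepA s
    let pid0 := pvHi16A s1
    let s2 := pvStepA s1
    -- 'pid |= _next16() << 16' : '|' of the disjoint low/high 16-bit halves, exact as '+ hi * 2^16'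
    let pid := pid0 + pvHi16A s2 * 65536
    if PySem.Int.mod pid 25 = nature then pid else pvFindA fuel nature s2

-- one iteration of 'for _ in range(max_advances + 1)', threading main_rng.state
def pvOuterA : Nat → Int → List Int
  | 0, _ => []
  | k+1, main =>
    let s3 := pvStepA (pvStepA (pvStepA main))      -- _next(2) then the _next16() of pid_nature
    let nature := PySem.Int.mod (pvHi16A s3) 25
    let pid := pvFindA 4294967296 nature s3
    pid :: pvOuterA k (pvStepA main)                 -- yield pid; main_rng._next()

def pidrng_wild (seed : Int) (initial_advances : Int) (max_advances : Int) (delay : Int) : List Int :=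
  pvOuterA (max_advances + 1).toNat (pvNextA seed (initial_advances + delay))

-- ===== PORT B =====
def pvStepB (s : Int) : Int := PySem.Int.mod (1103515245 * s + 24691) 4294967296

def pvHi16B (s : Int) : Int := PySem.Int.mod (PySem.Int.floordiv s 65536) 65536

-- the 'while n > 0' binary-exponentiation loop of _jump (n > 0 invariant: recursion on n.toNat)
def pvJumpAux (n : Nat) (a c pa pc : Int) : Int × Int :=
  if h : n = 0 then (a, c)
  else
    let ac := if n % 2 = 1 then
        (PySem.Int.mod (pa * a) 4294967296, PySem.Int.mod (pa * c + pc) 4294967296)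
      else (a, c)
    pvJumpAux (n / 2) ac.1 ac.2
      (PySem.Int.mod (pa * pa) 4294967296) (PySem.Int.mod (pa * pc + pc) 4294967296)
  decreasing_by exact Nat.div_lt_self (Nat.pos_of_ne_zero h) one_lt_two

def pvJumpB (state : Int) (n : Int) : Int :=
  let ac := pvJumpAux n.toNat 1 0 1103515245 24691
  PySem.Int.mod (ac.1 * state + ac.2) 4294967296

def pvFindB : Nat → Int → Int → Int
  | 0, _, _ => 0
  | fuel+1, nature, s =>
    let s1 := pvStepB s
    let lo := pvHi16B s1
    let s2 := pvStepB s1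
    let pid := lo + pvHi16B s2 * 65536               -- 'lo + (_hi16(s) << 16)'
    if PySem.Int.mod pid 25 = nature then pid else pvFindB fuel nature s2

def pvOuterB : Nat → Int → List Int
  | 0, _ => []
  | k+1, state =>
    let s3 := pvStepB (pvStepB (pvStepB state))      -- 'for _ in range(3)'
    let nature := PySem.Int.mod (pvHi16B s3) 25
    let pid := pvFindB 4294967296 nature s3
    pid :: pvOuterB k (pvStepB state)

def pidrng_wild_alt (seed : Int) (initial_advances : Int) (max_advances : Int) (delay : Int) : List Int :=
  pvOuterB (max_advances + 1).toNat (pvJumpB seed (initial_advances + delay))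

-- ===== PRECONDITION & SPEC =====
def Spec_pidrng_wild (seed : Int) (initial_advances : Int) (max_advances : Int) (delay : Int) (out : List Int) : Prop := out = pidrng_wild_alt seed initial_advances max_advances delay
instance (seed : Int) (initial_advances : Int) (max_advances : Int) (delay : Int) (out : List Int) : Decidable (Spec_pidrng_wild seed initial_advances max_advances delay out) := by unfold Spec_pidrng_wild; infer_instance

-- ===== CLAIM (what is proved, stated in full; the proofs are below) =====
def Claim_equal_pidrng_wild : Prop := ∀ (seed : Int) (initial_advances : Int) (max_advances : Int) (delay : Int), Dom_pidrng_wild seed initial_advances max_advances delay → Spec_pidrng_wild seed initial_advances max_advances delay (pidrng_wild seed initial_advances max_advances delay)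

-- ===== LEMMAS AND PROOFS =====

theorem pvStep_eq (s : Int) : pvStepA s = (1103515245 * s + 24691) % 4294967296 := by
  simp [pvStepA, PySem.Int.mod_eq_emod_of_pos (by norm_num : (0:Int) < 4294967296)]

theorem pvStepB_eq_A : pvStepB = pvStepA := rfl
theorem pvHi16B_eq_A : pvHi16B = pvHi16A := rfl

-- mod-congruence helper: x % M ≡ x
theorem pvModSelf (x : Int) : (x % 4294967296) ≡ x [ZMOD (4294967296:Int)] :=
  Int.emod_emod_of_dvd x dvd_rfl

-- the step absorbs a leading mask
theorem pvStep_mask (s : Int) : pvStepA (s % 4294967296) = pvStepA s := by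
  rw [pvStep_eq, pvStep_eq]
  exact (Int.ModEq.add (((pvModSelf s)).mul_left 1103515245) (Int.ModEq.refl 24691))

-- affine-map composition modulo 2^32
theorem pvComp (a1 c1 a2 c2 s : Int) :
    ((a2 * a1 % 4294967296) * s + (a2 * c1 + c2) % 4294967296) % 4294967296
      = (a2 * ((a1 * s + c1) % 4294967296) + c2) % 4294967296 := by
  have h1 : ((a2 * a1 % 4294967296) * s + (a2 * c1 + c2) % 4294967296)
      ≡ (a2 * a1 * s + (a2 * c1 + c2)) [ZMOD (4294967296:Int)] :=
    Int.ModEq.add ((pvModSelf (a2 * a1)).mul_right s) (pvModSelf (a2 * c1 + c2))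
  have h2 : (a2 * ((a1 * s + c1) % 4294967296) + c2)
      ≡ (a2 * (a1 * s + c1) + c2) [ZMOD (4294967296:Int)] :=
    Int.ModEq.add ((pvModSelf (a1 * s + c1)).mul_left a2) (Int.ModEq.refl c2)
  exact h1.trans ((by ring_nf : a2 * a1 * s + (a2 * c1 + c2) = a2 * (a1 * s + c1) + c2) ▸ h2.symm)

-- iterating the step from a masked start stays masked
theorem pvIter_mask (k : Nat) (s : Int) :
    (pvStepA^[k] (s % 4294967296)) % 4294967296 = pvStepA^[k] (s % 4294967296) := by
  cases k with
  | zero => simp [Int.emod_emod_of_dvd]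
  | succ m =>
    rw [Function.iterate_succ_apply']
    rw [pvStep_eq]
    exact Int.emod_emod_of_dvd _ dvd_rfl

-- semantics of the binary-exponentiation accumulator
theorem pvJumpAux_sem (n : Nat) :
    ∀ (i j : Nat) (a c pa pc : Int),
      (∀ s, (a * s + c) % 4294967296 = pvStepA^[i] (s % 4294967296)) →
      (∀ s, (pa * s + pc) % 4294967296 = pvStepA^[j] (s % 4294967296)) →
      ∀ s, ((pvJumpAux n a c pa pc).1 * s + (pvJumpAux n a c pa pc).2) % 4294967296
            = pvStepA^[i + j * n] (s % 4294967296) := by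
  induction n using Nat.strong_induction_on with
  | _ n ih =>
    intro i j a c pa pc ha hp s
    by_cases h : n = 0
    · subst h; simp [pvJumpAux, ha s]
    · rw [pvJumpAux]; simp only [h, dite_false]
      have hdiv : n / 2 < n := Nat.div_lt_self (Nat.pos_of_ne_zero h) one_lt_two
      have hp' : ∀ s, (PySem.Int.mod (pa * pa) 4294967296 * s
            + PySem.Int.mod (pa * pc + pc) 4294967296) % 4294967296
            = pvStepA^[j + j] (s % 4294967296) := by
        intro s
        rw [PySem.Int.mod_eq_emod_of_pos (by norm_num), PySem.Int.mod_eq_emod_of_pos (by norm_num)]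
        rw [pvComp pa pc pa pc s, hp s]
        rw [hp, pvIter_mask, ← Function.iterate_add_apply]
      by_cases hodd : n % 2 = 1
      · simp only [hodd, if_true]
        have ha' : ∀ s, (PySem.Int.mod (pa * a) 4294967296 * s
              + PySem.Int.mod (pa * c + pc) 4294967296) % 4294967296
              = pvStepA^[j + i] (s % 4294967296) := by
          intro s
          rw [PySem.Int.mod_eq_emod_of_pos (by norm_num), PySem.Int.mod_eq_emod_of_pos (by norm_num)]
          rw [pvComp a c pa pc s, ha s]
          rw [hp, pvIter_mask, ← Function.iterate_add_apply]
        have := ih (n / 2) hdiv (j + i) (j + j) _ _ _ _ ha' hp' s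
        rw [this]
        congr 1
        obtain ⟨k, hk⟩ : ∃ k, n = 2 * k + 1 := ⟨n / 2, by omega⟩
        subst hk
        have h2 : (2 * k + 1) / 2 = k := by omega
        rw [h2]; ring
      · simp only [hodd, if_false]
        have := ih (n / 2) hdiv i (j + j) a c _ _ ha hp' s
        rw [this]
        congr 1
        obtain ⟨k, hk⟩ : ∃ k, n = 2 * k := ⟨n / 2, by omega⟩
        subst hk
        have h2 : 2 * k / 2 = k := by omega
        rw [h2]; ring

-- the jump is exactly n.toNat iterated steps from the masked seed
theorem pvJumpB_sem (s n : Int) :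
    pvJumpB s n = pvStepA^[n.toNat] (s % 4294967296) := by
  have ha : ∀ t : Int, ((1:Int) * t + 0) % 4294967296 = pvStepA^[0] (t % 4294967296) := by
    intro t; simp
  have hp : ∀ t : Int, ((1103515245:Int) * t + 24691) % 4294967296 = pvStepA^[1] (t % 4294967296) := by
    intro t
    rw [Function.iterate_one, pvStep_mask, pvStep_eq]
  have := pvJumpAux_sem n.toNat 0 1 1 0 1103515245 24691 ha hp s
  simpa [pvJumpB, PySem.Int.mod_eq_emod_of_pos (by norm_num : (0:Int) < 4294967296)] using this

-- A's range-loop is the iterated step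
theorem pvNextA_eq (s : Int) (adv : Int) : pvNextA s adv = pvStepA^[adv.toNat] s := by
  unfold pvNextA
  have hfold : ∀ (l : List Int) (t : Int),
      l.foldl (fun st _ => pvStepA st) t = pvStepA^[l.length] t := by
    intro l
    induction l with
    | nil => intro t; rfl
    | cons x xs ihl =>
      intro t
      simp only [List.foldl_cons, List.length_cons, ihl, Function.iterate_succ_apply]
  rw [hfold]
  congr 1
  rw [PySem.List.length_pyRange_one]
  simp

-- the two rejection loops agree
theorem pvFind_eq (fuel : Nat) : ∀ nature s, pvFindB fuel nature s = pvFindA fuel nature s := by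
  induction fuel with
  | zero => intro _ _; rfl
  | succ m ih =>
    intro nature s
    simp only [pvFindA, pvFindB, pvStepB_eq_A, pvHi16B_eq_A, ih]

-- the two outer loops agree
theorem pvOuter_eq (k : Nat) : ∀ s, pvOuterB k s = pvOuterA k s := by
  induction k with
  | zero => intro _; rfl
  | succ m ih =>
    intro s
    simp only [pvOuterA, pvOuterB, pvStepB_eq_A, pvHi16B_eq_A, pvFind_eq, ih]

-- the outer loop only sees its state through the step, so a leading mask vanishes
theorem pvOuter_mask (k : Nat) (s : Int) :
    pvOuterA k (s % 4294967296) = pvOuterA k s := by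
  cases k with
  | zero => rfl
  | succ m => simp only [pvOuterA, pvStep_mask]

-- ===== VERDICT (by name: the statement is the Claim_ definition above) =====
theorem pidrng_wild_spec : Claim_equal_pidrng_wild := by
  intro seed ia ma d _
  unfold Spec_pidrng_wild
  unfold pidrng_wild pidrng_wild_alt
  rw [pvJumpB_sem, pvOuter_eq, pvNextA_eq]
  cases h : (ia + d).toNat with
  | zero => simp only [Function.iterate_zero_apply]; rw [pvOuter_mask]
  | succ m =>
    rw [Function.iterate_succ_apply, Function.iterate_succ_apply, pvStep_mask]
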